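-- pv_equiv track=rewrite | github.com/yumiao20071126/AWorld | examples/common/tools/browsers/action/utils.py | _convert_simple_xpath_to_css_selector
-- ===== SOURCE A (Python) =====
-- def _convert_simple_xpath_to_css_selector(xpath: str) -> str:
--     """Converts simple XPath expressions to CSS selectors."""
--     if not xpath:
--         return ''
--
--     # Remove leading slash if present
--     xpath = xpath.lstrip('/')
--
--     # Split into parts
--     parts = xpath.split('/')
--     css_parts = []
--
--     for part in parts:
--         if not part:
--             continue
--
--         # Handle index notation [n]
--         if '[' in part:
--             base_part = part[: part.find('[')]
--             index_part = part[part.find('['):]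
--
--             # Handle multiple indices
--             indices = [i.strip('[]') for i in index_part.split(']')[:-1]]
--
--             for idx in indices:
--                 try:
--                     # Handle numeric indices
--                     if idx.isdigit():
--                         index = int(idx) - 1
--                         base_part += f':nth-of-type({index + 1})'
--                     # Handle last() function
--                     elif idx == 'last()':
--                         base_part += ':last-of-type'
--                     # Handle position() functions
--                     elif 'position()' in idx:
--                         if '>1' in idx:
--                             base_part += ':nth-of-type(n+2)'
--                 except ValueError:
--                     continue
--
--             css_parts.append(base_part)
--         else:
--             css_parts.append(part)
--
--     base_selector = ' > '.join(css_parts)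
--     return base_selector
-- ===== SOURCE B (Python) =====
-- def _index_css(idx: str) -> str:
--     if idx.isdigit():
--         return ':nth-of-type(%d)' % int(idx)
--     if idx == 'last()':
--         return ':last-of-type'
--     if 'position()' in idx and '>1' in idx:
--         return ':nth-of-type(n+2)'
--     return ''
--
--
-- def _part_css(part: str) -> str:
--     # single left-to-right scan: tag chars pass through until the first '[',
--     # then bracket chunks are accumulated and emitted at each ']'
--     out = []
--     chunk = None  # None = still copying the tag
--     for c in part:
--         if chunk is None:
--             if c == '[':
--                 chunk = ''
--             else:
--                 out.append(c)
--         elif c == ']':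
--             out.append(_index_css(chunk.strip('[')))
--             chunk = ''
--         else:
--             chunk += c
--     return ''.join(out)
--
--
-- def _convert_simple_xpath_to_css_selector(xpath: str) -> str:
--     return ' > '.join(_part_css(p) for p in xpath.lstrip('/').split('/') if p)
-- ===== Notes on version B (the rewrite author's own statement) =====
-- stated objective: alternative
-- what changed: A's per-part bracket handling via find('['), two slices, split(']')[:-1] and per-chunk strip is replaced by a single left-to-right character scan per part (a small state machine that copies tag characters and emits a selector suffix at each ']'), with the outer loop as a filter/map comprehension.
import Mathlib
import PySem

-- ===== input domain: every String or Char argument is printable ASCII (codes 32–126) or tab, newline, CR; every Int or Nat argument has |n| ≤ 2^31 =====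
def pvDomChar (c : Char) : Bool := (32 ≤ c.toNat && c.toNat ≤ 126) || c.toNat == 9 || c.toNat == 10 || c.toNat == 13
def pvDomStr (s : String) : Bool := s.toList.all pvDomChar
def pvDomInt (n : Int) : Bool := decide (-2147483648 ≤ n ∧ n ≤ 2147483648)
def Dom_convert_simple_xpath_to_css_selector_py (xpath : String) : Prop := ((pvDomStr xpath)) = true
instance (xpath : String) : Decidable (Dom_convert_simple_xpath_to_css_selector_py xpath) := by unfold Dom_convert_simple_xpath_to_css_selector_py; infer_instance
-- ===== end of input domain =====

-- B replaces A's multi-pass bracket handling (find / slice / split(']')[:-1] / strip per part)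
-- by a single left-to-right character scan per part (objective: alternative decomposition, same cost).

-- ===== PORT A =====

-- the body of A's 'for idx in indices' loop (the try/except: int() on an isdigit string never raises;
-- the none branch is the 'except ValueError: continue')
def pySuffixA (base : List Char) (idx : List Char) : List Char :=
  if PySem.Chars.strIsdigit idx then
    match PySem.Int.ofChars? idx with
    | some n => base ++ ":nth-of-type(".toList ++ PySem.Int.toChars ((n - 1) + 1) ++ [')']
    | none => base
  else if idx = "last()".toList then
    base ++ ":last-of-type".toList
  else if PySem.Chars.isIn "position()".toList idx then
    if PySem.Chars.isIn ">1".toList idx then base ++ ":nth-of-type(n+2)".toList else base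
  else base

def convert_simple_xpath_to_css_selector_py (xpath : String) : String :=
  if xpath = "" then "" else
  -- xpath.lstrip('/'): exact — drops every leading '/'
  let x := xpath.toList.dropWhile (· == '/')
  let parts := PySem.Chars.splitOn x ['/']
  let css_parts := parts.foldl (fun acc part =>
    if part = [] then acc
    else if PySem.Chars.isIn ['['] part then
      let i := PySem.Chars.find part ['[']
      let base_part := PySem.List.slice part none (some i)
      let index_part := PySem.List.slice part (some i) none
      let indices := ((PySem.Chars.splitOn index_part [']']).dropLast).map
        (fun s => PySem.Chars.stripChars s ['[', ']'])
      acc ++ [indices.foldl pySuffixA base_part]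
    else acc ++ [part]) ([] : List (List Char))
  String.ofList (PySem.Chars.join " > ".toList css_parts)

-- ===== PORT B =====

-- Source B's _index_css
def pyIndexCss (idx : List Char) : List Char :=
  if PySem.Chars.strIsdigit idx then
    match PySem.Int.ofChars? idx with
    | some n => ":nth-of-type(".toList ++ PySem.Int.toChars n ++ [')']
    | none => []
  else if idx = "last()".toList then
    ":last-of-type".toList
  else if PySem.Chars.isIn "position()".toList idx && PySem.Chars.isIn ">1".toList idx then
    ":nth-of-type(n+2)".toList
  else []

-- Source B's _part_css loop body: state = (chunk : Option, out)
def pyPartStep (st : Option (List Char) × List Char) (c : Char) : Option (List Char) × List Char :=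
  match st with
  | (none, out) => if c = '[' then (some [], out) else (none, out ++ [c])
  | (some chunk, out) =>
      if c = ']' then (some [], out ++ pyIndexCss (PySem.Chars.stripChars chunk ['[']))
      else (some (chunk ++ [c]), out)

def pyPartCss (part : List Char) : List Char :=
  (part.foldl pyPartStep (none, [])).2

def convert_simple_xpath_to_css_selector_py_alt (xpath : String) : String :=
  String.ofList (PySem.Chars.join " > ".toList
    (((PySem.Chars.splitOn (xpath.toList.dropWhile (· == '/')) ['/']).filter
        (fun p => p ≠ [])).map pyPartCss))

-- ===== PRECONDITION & SPEC =====
def Spec_convert_simple_xpath_to_css_selector_py (xpath : String) (out : String) : Prop := out = convert_simple_xpath_to_css_selector_py_alt xpath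
instance (xpath : String) (out : String) : Decidable (Spec_convert_simple_xpath_to_css_selector_py xpath out) := by unfold Spec_convert_simple_xpath_to_css_selector_py; infer_instance

-- ===== CLAIM (what is proved, stated in full; the proofs are below) =====
def Claim_equal_convert_simple_xpath_to_css_selector_py : Prop := ∀ (xpath : String), Dom_convert_simple_xpath_to_css_selector_py xpath → Spec_convert_simple_xpath_to_css_selector_py xpath (convert_simple_xpath_to_css_selector_py xpath)

-- ===== LEMMAS AND PROOFS =====

-- reference version of Python's single-char split (CPython keeps empty pieces; trailing piece kept)
def mysplit (s : Char) : List Char → List (List Char)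
  | [] => [[]]
  | c :: r =>
      if c = s then [] :: mysplit s r
      else match mysplit s r with
           | h :: t => (c :: h) :: t
           | [] => [[c]]

theorem mysplit_ne_nil (s : Char) (l : List Char) : mysplit s l ≠ [] := by
  induction l with
  | nil => simp [mysplit]
  | cons c r ih =>
      simp only [mysplit]
      split
      · simp
      · cases h : mysplit s r <;> simp

theorem splitOn_go_eq (s : Char) (fuel : Nat) :
    ∀ (l cur : List Char) (acc : List (List Char)), l.length < fuel →
      PySem.Chars.splitOn.go [s] fuel l cur acc =
        acc.reverse ++ (match mysplit s l with
          | h :: t => (cur.reverse ++ h) :: t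
          | [] => []) := by
  induction fuel with
  | zero => intro l cur acc h; omega
  | succ n ih =>
      intro l cur acc h
      cases l with
      | nil => simp [PySem.Chars.splitOn.go, mysplit]
      | cons c rest =>
          by_cases hc : c = s
          · subst hc
            have hpre : [c].isPrefixOf (c :: rest) = true := by simp [List.isPrefixOf]
            simp only [PySem.Chars.splitOn.go, hpre, if_pos, List.length_singleton,
              List.drop_succ_cons, List.drop_zero]
            rw [ih rest [] (cur.reverse :: acc) (by simpa using Nat.lt_of_succ_lt_succ h)]
            have hne := mysplit_ne_nil c rest
            cases hm : mysplit c rest with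
            | nil => exact absurd hm hne
            | cons h' t' => simp [mysplit, hm]
          · have hpre : [s].isPrefixOf (c :: rest) = false := by
              simp [List.isPrefixOf]; exact fun hh => (hc hh.symm).elim
            simp only [PySem.Chars.splitOn.go, hpre, Bool.false_eq_true, if_false]
            rw [ih rest (c :: cur) acc (by simpa using Nat.lt_of_succ_lt_succ h)]
            have hne := mysplit_ne_nil s rest
            cases hm : mysplit s rest with
            | nil => exact absurd hm hne
            | cons h' t' => simp [mysplit, hm, hc]

theorem splitOn_eq_mysplit (s : Char) (l : List Char) :
    PySem.Chars.splitOn l [s] = mysplit s l := by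
  unfold PySem.Chars.splitOn
  rw [splitOn_go_eq s (l.length + 1) l [] [] (Nat.lt_succ_self _)]
  have hne := mysplit_ne_nil s l
  cases hm : mysplit s l with
  | nil => exact absurd hm hne
  | cons h t => simp

theorem mysplit_no_sep {s : Char} {l : List Char} (h : s ∉ l) : mysplit s l = [l] := by
  induction l with
  | nil => simp [mysplit]
  | cons c r ih =>
      have hc : c ≠ s := fun hh => h (hh ▸ List.mem_cons_self ..)
      have hr : s ∉ r := fun hh => h (List.mem_cons_of_mem _ hh)
      simp [mysplit, hc, ih hr]

theorem mysplit_append_sep {s : Char} {pre : List Char} (rest : List Char) (h : s ∉ pre) :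
    mysplit s (pre ++ s :: rest) = pre :: mysplit s rest := by
  induction pre with
  | nil => simp [mysplit]
  | cons c p ih =>
      have hc : c ≠ s := fun hh => h (hh ▸ List.mem_cons_self ..)
      have hp : s ∉ p := fun hh => h (List.mem_cons_of_mem _ hh)
      simp [mysplit, hc, ih hp, mysplit_ne_nil]

theorem mysplit_mem_no_sep (s : Char) (l : List Char) :
    ∀ t ∈ mysplit s l, s ∉ t := by
  induction l with
  | nil => simp [mysplit]
  | cons c r ih =>
      simp only [mysplit]
      split
      · intro t ht
        rcases List.mem_cons.1 ht with h | h
        · subst h; simp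
        · exact ih t h
      · rename_i hc
        cases hm : mysplit s r with
        | nil => exact absurd hm (mysplit_ne_nil _ _)
        | cons h' t' =>
            simp only [hm]
            intro t ht
            rcases List.mem_cons.1 ht with h | h
            · subst h
              intro hmem
              rcases List.mem_cons.1 hmem with h | h
              · exact hc h.symm
              · exact ih h' (hm ▸ List.mem_cons_self ..) h
            · exact ih t (hm ▸ List.mem_cons_of_mem _ h)

-- Python str.find for a single-character needle
theorem find_go_singleton (c : Char) (l : List Char) :
    ∀ k : Nat, PySem.Chars.find.go [c] l k =
      if c ∈ l then ((k : Int) + (l.takeWhile (· ≠ c)).length) else -1 := by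
  induction l with
  | nil => intro k; simp [PySem.Chars.find.go]
  | cons d r ih =>
      intro k
      by_cases hd : d = c
      · subst hd
        have h1 : [d].isPrefixOf (d :: r) = true := by simp [List.isPrefixOf]
        rw [show PySem.Chars.find.go [d] (d::r) k = ((k:Int)) by simp [PySem.Chars.find.go, h1]]
        rw [if_pos (List.mem_cons_self ..)]
        simp
      · have hpre : [c].isPrefixOf (d :: r) = false := by
          simp [List.isPrefixOf]; exact fun hh => (hd hh.symm).elim
        rw [show PySem.Chars.find.go [c] (d::r) k = PySem.Chars.find.go [c] r (k+1) by
          simp [PySem.Chars.find.go, hpre]]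
        rw [ih (k + 1)]
        have htw : (d :: r).takeWhile (fun x => decide (x ≠ c)) = d :: r.takeWhile (fun x => decide (x ≠ c)) := by
          simp [hd]
        by_cases hm : c ∈ r
        · rw [if_pos hm, if_pos (List.mem_cons_of_mem _ hm)]
          simp only [htw]
          push_cast
          simp
          ring
        · rw [if_neg hm, if_neg (by simp [hm]; exact fun hh => (hd hh.symm).elim)]

theorem find_singleton {c : Char} {l : List Char} (h : c ∈ l) :
    PySem.Chars.find l [c] = ((l.takeWhile (· ≠ c)).length : Int) := by
  unfold PySem.Chars.find
  rw [find_go_singleton c l 0]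
  simp [h]

theorem isIn_singleton (c : Char) (l : List Char) :
    PySem.Chars.isIn [c] l = l.contains c := by
  unfold PySem.Chars.isIn
  rw [show PySem.Chars.find l [c] = PySem.Chars.find.go [c] l 0 from rfl, find_go_singleton]
  by_cases h : c ∈ l
  · rw [if_pos h]
    simp [h]
  · rw [if_neg h]
    simp [h]

-- strip-chars facts
theorem stripChars_congr {l : List Char} (h : ']' ∉ l) :
    PySem.Chars.stripChars l ['[', ']'] = PySem.Chars.stripChars l ['['] := by
  have key : ∀ m : List Char, ']' ∉ m →
      (m.dropWhile (fun c => (['[', ']'].contains c)) = m.dropWhile (fun c => (['['].contains c))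
       ∧ ']' ∉ m.dropWhile (fun c => (['['].contains c))) := by
    intro m hm
    induction m with
    | nil => simp
    | cons a t ih =>
        have ha : a ≠ ']' := fun hh => hm (hh ▸ List.mem_cons_self ..)
        have ht : ']' ∉ t := fun hh => hm (List.mem_cons_of_mem _ hh)
        by_cases hab : a = '['
        · subst hab
          simpa [List.dropWhile] using ih ht
        · constructor
          · simp [List.dropWhile, hab, ha]
          · simp [List.dropWhile, hab]
            exact ⟨fun hh => ha hh.symm, ht⟩
  show (List.dropWhile _ (List.dropWhile _ l).reverse).reverse = (List.dropWhile _ (List.dropWhile _ l).reverse).reverse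
  have h1 := key _ h
  rw [h1.1]
  have h2 := key _ (fun hc => h1.2 (List.mem_reverse.1 hc))
  rw [h2.1]

theorem stripChars_cons_bracket (l : List Char) :
    PySem.Chars.stripChars ('[' :: l) ['['] = PySem.Chars.stripChars l ['['] := by
  show (List.dropWhile _ (List.dropWhile _ ('[' :: l)).reverse).reverse =
    (List.dropWhile _ (List.dropWhile _ l).reverse).reverse
  simp [List.dropWhile]

-- the A-loop body appends a piece to its accumulator
def suffA (idx : List Char) : List Char := pySuffixA [] idx

theorem pySuffixA_append (base idx : List Char) : pySuffixA base idx = base ++ suffA idx := by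
  unfold pySuffixA suffA pySuffixA
  split_ifs <;> first
    | (cases PySem.Int.ofChars? idx <;> simp)
    | simp

theorem suffA_eq_pyIndexCss (idx : List Char) : suffA idx = pyIndexCss idx := by
  unfold suffA pySuffixA pyIndexCss
  by_cases h1 : PySem.Chars.strIsdigit idx = true
  · rw [if_pos h1, if_pos h1]
    cases PySem.Int.ofChars? idx with
    | none => simp
    | some n =>
        have hn : n - 1 + 1 = n := by omega
        simp [hn]
  · rw [if_neg h1, if_neg h1]
    by_cases h2 : idx = "last()".toList
    · rw [if_pos h2, if_pos h2]; simp
    · rw [if_neg h2, if_neg h2]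
      have hiff : ∀ (a b : Bool) (x y : List Char),
          (if a = true then (if b = true then [] ++ x else y) else y) =
            (if (a && b) = true then x else y) := by
        intro a b x y
        cases a <;> cases b <;> simp
      exact hiff _ _ _ _

theorem foldl_suffA (indices : List (List Char)) (base : List Char) :
    indices.foldl pySuffixA base = base ++ (indices.map suffA).flatten := by
  induction indices generalizing base with
  | nil => simp
  | cons i t ih => simp [List.foldl_cons, pySuffixA_append, ih]

-- the B machine, bracket phase
theorem machine_eq (r : List Char) :
    ∀ (chunk out : List Char), ']' ∉ chunk →
      (r.foldl pyPartStep (some chunk, out)).2 =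
        out ++ (((mysplit ']' (chunk ++ r)).dropLast).map
          (fun t => pyIndexCss (PySem.Chars.stripChars t ['[']))).flatten := by
  induction r with
  | nil =>
      intro chunk out h
      simp [mysplit_no_sep h]
  | cons c r' ih =>
      intro chunk out h
      by_cases hc : c = ']'
      · subst hc
        have step : pyPartStep (some chunk, out) ']' =
            (some [], out ++ pyIndexCss (PySem.Chars.stripChars chunk ['['])) := by
          simp [pyPartStep]
        rw [List.foldl_cons, step, ih [] _ (by simp)]
        rw [mysplit_append_sep r' h]
        have hne := mysplit_ne_nil ']' r'
        rw [List.dropLast_cons_of_ne_nil hne]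
        simp
      · have step : pyPartStep (some chunk, out) c = (some (chunk ++ [c]), out) := by
          simp [pyPartStep, hc]
        rw [List.foldl_cons, step,
          ih (chunk ++ [c]) out (by simp [h]; exact fun hh => (hc hh.symm).elim)]
        simp

-- the B machine, tag phase
theorem tag_phase (t : List Char) :
    ∀ out : List Char, '[' ∉ t → t.foldl pyPartStep (none, out) = (none, out ++ t) := by
  induction t with
  | nil => simp
  | cons c r ih =>
      intro out h
      have hc : c ≠ '[' := fun hh => h (hh ▸ List.mem_cons_self ..)
      have hr : '[' ∉ r := fun hh => h (List.mem_cons_of_mem _ hh)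
      rw [List.foldl_cons, show pyPartStep (none, out) c = (none, out ++ [c]) by simp [pyPartStep, hc],
        ih _ hr]
      simp

theorem pyPartCss_no_bracket {part : List Char} (h : '[' ∉ part) : pyPartCss part = part := by
  unfold pyPartCss
  rw [tag_phase part [] h]
  simp

theorem pyPartCss_bracket (t r : List Char) (h : '[' ∉ t) :
    pyPartCss (t ++ '[' :: r) =
      t ++ (((mysplit ']' r).dropLast).map
        (fun s => pyIndexCss (PySem.Chars.stripChars s ['[']))).flatten := by
  unfold pyPartCss
  rw [List.foldl_append, tag_phase t [] h, List.foldl_cons,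
    show pyPartStep (none, [] ++ t) '[' = (some [], t) by simp [pyPartStep],
    machine_eq r [] t (by simp)]
  simp

-- head of a non-trivial dropWhile fails the predicate
theorem dropWhile_eq_cons_head_false {p : Char → Bool} {l r : List Char} {d : Char}
    (h : l.dropWhile p = d :: r) : p d = false := by
  induction l with
  | nil => simp at h
  | cons a t ih =>
      rw [List.dropWhile_cons] at h
      split at h
      · exact ih h
      · rename_i hpa
        cases h
        simpa using hpa

-- the per-part equality: A's loop body value = B's scan
theorem part_eq (part : List Char) :
    (if PySem.Chars.isIn ['['] part then
      (((PySem.Chars.splitOn (PySem.List.slice part (some (PySem.Chars.find part ['['])) none)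
          [']']).dropLast).map (fun s => PySem.Chars.stripChars s ['[', ']'])).foldl
        pySuffixA (PySem.List.slice part none (some (PySem.Chars.find part ['['])))
    else part) = pyPartCss part := by
  by_cases h : '[' ∈ part
  · -- decompose part = t ++ '[' :: r
    set p : Char → Bool := (fun c => c ≠ '[') with hp
    have hsplit : part = part.takeWhile p ++ part.dropWhile p := (List.takeWhile_append_dropWhile).symm
    have hnd : part.dropWhile p ≠ [] := by
      intro hnil
      have : '[' ∈ part.takeWhile p := by
        rw [hsplit] at h; simpa [hnil] using h
      have := List.mem_takeWhile_imp this
      simp [hp] at this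
    obtain ⟨d, r, hdr⟩ := List.exists_cons_of_ne_nil hnd
    have hd : d = '[' := by
      have := dropWhile_eq_cons_head_false hdr
      simpa [hp] using this
    subst hd
    have htake : '[' ∉ part.takeWhile p := by
      intro hh
      have := List.mem_takeWhile_imp hh
      simp [hp] at this
    have hfind : PySem.Chars.find part ['['] = ((part.takeWhile p).length : Int) :=
      find_singleton h
    have hisin : PySem.Chars.isIn ['['] part = true := by
      rw [isIn_singleton]; simpa using h
    have hslice1 : PySem.List.slice part none (some (PySem.Chars.find part ['['])) =
        part.takeWhile p := by
      rw [hfind, PySem.List.slice_to_natCast]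
      exact (List.prefix_iff_eq_take.mp (List.takeWhile_prefix p)).symm
    have hslice2 : PySem.List.slice part (some (PySem.Chars.find part ['['])) none =
        '[' :: r := by
      rw [hfind, PySem.List.slice_from_natCast]
      have hq := congrArg (List.drop (part.takeWhile p).length) hsplit
      rw [List.drop_left] at hq
      rw [hq, hdr]
    rw [hisin, if_pos rfl, hslice1, hslice2]
    rw [splitOn_eq_mysplit]
    have hB : pyPartCss part =
        part.takeWhile p ++ (((mysplit ']' r).dropLast).map
          (fun s => pyIndexCss (PySem.Chars.stripChars s ['[']))).flatten := by
      conv_lhs => rw [hsplit, hdr]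
      exact pyPartCss_bracket _ _ htake
    rw [hB, foldl_suffA]
    congr 1
    cases hm : mysplit ']' r with
    | nil => exact absurd hm (mysplit_ne_nil _ _)
    | cons h' t' =>
        have hmem := mysplit_mem_no_sep ']' r
        rw [hm] at hmem
        rw [show (mysplit ']' ('[' :: r)) = ('[' :: h') :: t' by simp [mysplit, hm]]
        cases t' with
        | nil => simp
        | cons h2 t2 =>
            rw [List.dropLast_cons₂, List.dropLast_cons₂]
            simp only [List.map_cons, List.flatten_cons]
            congr 1
            · -- head chunk: strip "[]" ('[' :: h') = strip "[" h'
              have hno : ']' ∉ ('[' :: h') := by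
                intro hh
                rcases List.mem_cons.1 hh with hh | hh
                · exact absurd hh.symm (by decide)
                · exact hmem h' (List.mem_cons_self ..) hh
              rw [suffA_eq_pyIndexCss, stripChars_congr hno, stripChars_cons_bracket]
            · -- later chunks
              rw [List.map_map]
              congr 1
              apply List.map_congr_left
              intro x hx
              have hxm : x ∈ h' :: h2 :: t2 :=
                List.mem_cons_of_mem _ (List.dropLast_subset _ hx)
              show suffA (PySem.Chars.stripChars x ['[', ']']) = _
              rw [suffA_eq_pyIndexCss, stripChars_congr (hmem x hxm)]
  · have hisin : PySem.Chars.isIn ['['] part = false := by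
      rw [isIn_singleton]; simpa using h
    rw [hisin]
    simp [pyPartCss_no_bracket h]

-- A's accumulator loop is filter-then-map
theorem foldl_filter_map (g : List Char → List Char) (parts : List (List Char)) :
    ∀ acc : List (List Char),
      parts.foldl (fun acc part => if part = [] then acc else acc ++ [g part]) acc =
        acc ++ (parts.filter (fun p => p ≠ [])).map g := by
  induction parts with
  | nil => simp
  | cons p t ih =>
      intro acc
      by_cases hp : p = []
      · simp [hp, ih]
      · simp [hp, ih, List.filter_cons]

-- ===== VERDICT (by name: the statement is the Claim_ definition above) =====
theorem convert_simple_xpath_to_css_selector_py_spec : Claim_equal_convert_simple_xpath_to_css_selector_py := by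
  intro xpath _
  unfold Spec_convert_simple_xpath_to_css_selector_py
  unfold convert_simple_xpath_to_css_selector_py convert_simple_xpath_to_css_selector_py_alt
  by_cases hx : xpath = ""
  · subst hx; rfl
  · rw [if_neg hx]
    have hbody : (fun (acc : List (List Char)) (part : List Char) =>
        if part = [] then acc
        else if PySem.Chars.isIn ['['] part then
          let i := PySem.Chars.find part ['[']
          let base_part := PySem.List.slice part none (some i)
          let index_part := PySem.List.slice part (some i) none
          let indices := ((PySem.Chars.splitOn index_part [']']).dropLast).map
            (fun s => PySem.Chars.stripChars s ['[', ']'])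
          acc ++ [indices.foldl pySuffixA base_part]
        else acc ++ [part]) =
        (fun (acc : List (List Char)) (part : List Char) =>
          if part = [] then acc else acc ++ [pyPartCss part]) := by
      funext acc part
      by_cases hp : part = []
      · simp [hp]
      · rw [if_neg hp, if_neg hp]
        have hpe := part_eq part
        by_cases hb : PySem.Chars.isIn ['['] part = true
        · rw [if_pos hb] at hpe ⊢
          exact congrArg (fun z => acc ++ [z]) hpe
        · rw [if_neg hb] at hpe ⊢
          exact congrArg (fun z => acc ++ [z]) hpe
    simp only [hbody]
    rw [foldl_filter_map pyPartCss _ []]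
    rfl
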